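-- pv_equiv track=rewrite | github.com/AlYousif-dev/neetcode-submissions-5y4jwo9p | Data Structures & Algorithms/strobogrammatic-number/submission-1.py | isStrobogrammatic
-- ===== SOURCE A (Python) =====
-- def isStrobogrammatic(num: str) -> bool:
--     sub = {'8':'8', '6':'9', '9':'6', '0':'0', '1':'1'}
--     temp = num
--     num = num [::-1]
--     res = ""
--     for s in num:
--         if s not in sub:
--             return False
--         res += sub[s]
--     return res == temp
-- ===== SOURCE B (Python) =====
-- def isStrobogrammatic(num: str) -> bool:
--     sub = {'8': '8', '6': '9', '9': '6', '0': '0', '1': '1'}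
--     return all(sub.get(c) == d for c, d in zip(num, reversed(num)))
-- ===== Notes on version B (the rewrite author's own statement) =====
-- stated objective: idiomatic
-- what changed: Instead of building a mapped copy of the reversed string and comparing it to the original, B pairs each character with its mirror position via zip(num, reversed(num)) and checks all pairs in one pass with no string construction.
import Mathlib
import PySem

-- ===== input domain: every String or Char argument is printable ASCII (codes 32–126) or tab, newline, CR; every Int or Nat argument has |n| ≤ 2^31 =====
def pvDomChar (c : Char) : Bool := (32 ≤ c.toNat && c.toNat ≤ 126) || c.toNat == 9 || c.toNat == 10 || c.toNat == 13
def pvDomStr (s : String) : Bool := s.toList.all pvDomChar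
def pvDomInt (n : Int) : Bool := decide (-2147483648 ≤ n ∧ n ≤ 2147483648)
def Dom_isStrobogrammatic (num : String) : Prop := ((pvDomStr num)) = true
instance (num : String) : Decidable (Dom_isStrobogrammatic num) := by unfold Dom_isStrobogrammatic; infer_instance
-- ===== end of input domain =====

-- B pairs each character with its mirror via zip(num, reversed(num)) and checks all pairs in
-- one pass, instead of A's building a mapped copy of the reversed string and comparing it.

-- ===== PORT A =====
-- the dict literal sub
def subA : PySem.Dict Char Char :=
  PySem.Dict.ofList [('8','8'), ('6','9'), ('9','6'), ('0','0'), ('1','1')]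

-- the `for s in num: …` loop with early return; res accumulates, temp is the original num
def aLoop (rest : List Char) (res : List Char) (temp : List Char) : Bool :=
  match rest with
  | [] => res == temp                 -- return res == temp
  | s :: rest' =>
    match subA.get? s with
    | none => false                   -- if s not in sub: return False
    | some d => aLoop rest' (res ++ [d]) temp   -- res += sub[s]

def isStrobogrammatic (num : String) : Bool :=
  aLoop num.toList.reverse [] num.toList   -- temp = num; num = num[::-1]; res = ""

-- ===== PORT B =====
def subB : PySem.Dict Char Char :=
  PySem.Dict.ofList [('8','8'), ('6','9'), ('9','6'), ('0','0'), ('1','1')]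

-- all(sub.get(c) == d for c, d in zip(num, reversed(num)))
def isStrobogrammatic_alt (num : String) : Bool :=
  (num.toList.zip num.toList.reverse).all (fun cd => subB.get? cd.1 == some cd.2)

-- ===== PRECONDITION & SPEC =====
def Spec_isStrobogrammatic (num : String) (out : Bool) : Prop := out = isStrobogrammatic_alt num
instance (num : String) (out : Bool) : Decidable (Spec_isStrobogrammatic num out) := by unfold Spec_isStrobogrammatic; infer_instance

-- ===== CLAIM (what is proved, stated in full; the proofs are below) =====
def Claim_equal_isStrobogrammatic : Prop := ∀ (num : String), Dom_isStrobogrammatic num → Spec_isStrobogrammatic num (isStrobogrammatic num)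

-- ===== LEMMAS AND PROOFS =====

theorem sub_eq (c : Char) : subA.get? c =
    if c = '8' then some '8' else if c = '6' then some '9' else if c = '9' then some '6'
    else if c = '0' then some '0' else if c = '1' then some '1' else none := by
  have h : subA = PySem.Dict.mk [('8','8'),('6','9'),('9','6'),('0','0'),('1','1')] := by decide
  rw [h]
  simp [PySem.Dict.get?_mk_cons]
  split_ifs <;> simp_all [eq_comm] <;> rfl

theorem subB_eq_subA : subB = subA := by decide

-- the mapping is symmetric: sub a = some b ↔ sub b = some a
theorem sub_symm {a b : Char} (h : subA.get? a = some b) : subA.get? b = some a := by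
  rw [sub_eq] at h
  split_ifs at h with h1 h2 h3 h4 h5
  · cases h; subst h1; decide
  · cases h; subst h2; decide
  · cases h; subst h3; decide
  · cases h; subst h4; decide
  · cases h; subst h5; decide

-- mapM over Option is Forall₂ of the graph
theorem mapM_forall2 (f : Char → Option Char) (xs ys : List Char) :
    xs.mapM f = some ys ↔ List.Forall₂ (fun a b => f a = some b) xs ys := by
  induction xs generalizing ys with
  | nil => cases ys <;> simp
  | cons x xs' ih =>
    simp only [List.mapM_cons, Option.bind_eq_bind, Option.bind_eq_some_iff]
    cases ys with
    | nil =>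
      simp only [List.forall₂_nil_right_iff]
      constructor
      · rintro ⟨d, -, m, -, h⟩; simp at h
      · rintro ⟨⟩
    | cons y ys' =>
      rw [List.forall₂_cons]
      constructor
      · rintro ⟨d, hd, m, hm, h⟩
        obtain ⟨rfl, rfl⟩ : d = y ∧ m = ys' := by simp_all
        exact ⟨hd, (ih _).mp hm⟩
      · rintro ⟨hy, hf⟩
        exact ⟨y, hy, ys', (ih _).mpr hf, rfl⟩

-- A's loop succeeds iff the whole rest maps and res ++ image = temp
theorem aLoop_eq (rest res temp : List Char) :
    aLoop rest res temp = true ↔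
      ∃ m, rest.mapM subA.get? = some m ∧ res ++ m = temp := by
  induction rest generalizing res with
  | nil => simp [aLoop]
  | cons s rest' ih =>
    simp only [aLoop, List.mapM_cons, Option.bind_eq_bind]
    cases h : subA.get? s with
    | none => simp
    | some d =>
      rw [ih]
      constructor
      · rintro ⟨m, hm, he⟩
        exact ⟨d :: m, by simp [hm], by simpa [List.append_assoc] using he⟩
      · rintro ⟨m, hm, he⟩
        simp only [Option.bind_eq_some_iff] at hm
        obtain ⟨d', hd', m', hm', hpp⟩ := hm
        obtain rfl : d = d' := by simpa using hd'
        obtain rfl : d :: m' = m := by simpa using hpp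
        exact ⟨m', hm', by simpa [List.append_assoc] using he⟩

theorem forall2_swap (xs ys : List Char)
    (h : List.Forall₂ (fun a b => subA.get? a = some b) xs ys) :
    List.Forall₂ (fun a b => subA.get? a = some b) ys xs := by
  have h' : List.Forall₂ (flip (fun a b => subA.get? a = some b)) ys xs := List.Forall₂.flip h
  exact h'.imp (fun a b hab => sub_symm hab)

-- ===== VERDICT (by name: the statement is the Claim_ definition above) =====
theorem isStrobogrammatic_spec : Claim_equal_isStrobogrammatic := by
  intro num _
  unfold Spec_isStrobogrammatic isStrobogrammatic isStrobogrammatic_alt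
  set l := num.toList with hl
  rw [Bool.eq_iff_iff, aLoop_eq, List.all_eq_true]
  constructor
  · rintro ⟨m, hm, he⟩
    obtain rfl : m = l := by simpa using he
    have hf : List.Forall₂ (fun a b => subA.get? a = some b) l l.reverse :=
      forall2_swap _ _ ((mapM_forall2 _ _ _).mp hm)
    intro p hp
    have := (List.forall₂_iff_zip.mp hf).2 hp
    simp [subB_eq_subA, this]
  · intro hall
    have hf : List.Forall₂ (fun a b => subA.get? a = some b) l l.reverse := by
      refine List.forall₂_iff_zip.mpr ⟨by simp, ?_⟩
      intro a b hab
      have := hall (a, b) hab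
      simpa [subB_eq_subA] using this
    exact ⟨l, by simp [(mapM_forall2 _ _ _).mpr (forall2_swap _ _ hf)]⟩
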